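-- pv_equiv track=rewrite | github.com/Kawser-nerd/CLCDSA | Source Codes/AtCoder/arc021/C/4628150.py | solve
-- ===== SOURCE A (Python) =====
-- import bisect
--
-- X_MAX = 10 ** 20
--
-- def calc(k, n, a, d, y):
--     r = k
--     for i in range(n):
--         if a[i] < y:
--             r -= (y - a[i] + d[i] - 1) // d[i]
--             if r < 0:
--                 return r
--     return r
--
-- def solve(k, n, a, d):
--
--     ok = 1
--     ng = X_MAX
--     while ok + 1 < ng:
--         mid = (ok + ng) // 2
--         if calc(k, n, a, d, mid) < 0:
--             ng = mid
--         else: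
--             ok = mid
--
--     ans = 0
--     r = k
--     lst = []
--     for i in range(n):
--         if a[i] < ok:
--             x = (ok - a[i] + d[i] - 1) // d[i]
--             ans += a[i] * x + d[i] * x * (x - 1) // 2
--             r -= x
--             lst.append((a[i] + d[i] * x, i))
--         else:
--             lst.append((a[i], i))
--
--     lst.sort()
--     while 0 < r:
--         y, i = lst.pop(0)
--         ans += y
--         r -= 1
--         v = (y + d[i], i)
--         lst.insert(bisect.bisect_left(lst, v), v)
--
--     return ans
-- ===== SOURCE B (Python) =====
-- def solve(k, n, a, d):
--     seqs = [(a[i], d[i]) for i in range(n)]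
--
--     def steps(ai, di, y):
--         # items taken from sequence (ai, ai+di, ...) to reach y
--         return (y - ai + di - 1) // di if ai < y else 0
--
--     def need(y):
--         return sum(steps(ai, di, y) for ai, di in seqs)
--
--     ok, ng = 1, 10 ** 20
--     while ok + 1 < ng:
--         mid = (ok + ng) // 2
--         if need(mid) <= k:
--             ok = mid
--         else:
--             ng = mid
--
--     ans = sum(ai * steps(ai, di, ok) + di * steps(ai, di, ok) * (steps(ai, di, ok) - 1) // 2
--               for ai, di in seqs)
--     r = k - need(ok)
--     if r > 0:
--         vals = sorted(ai + di * (steps(ai, di, ok) + t) for ai, di in seqs for t in range(r))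
--         ans += sum(vals[:r])
--     return ans
-- ===== Notes on version B (the rewrite author's own statement) =====
-- stated objective: alternative
-- what changed: Phase 1 (binary search for the threshold ok and the closed-form phase-1 sum) is kept; the finishing greedy loop (repeatedly pop the minimum of a sorted list and re-insert the popped sequence's next value with bisect) is replaced by a batch computation: each sequence emits its next r values in closed form, all emitted values are sorted once and the r smallest are summed.
-- outside the precondition, e.g. on solve(6, 3, [5, 1, -3], [1, 1, -2]): A returns 20, B returns 38
import Mathlib
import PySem

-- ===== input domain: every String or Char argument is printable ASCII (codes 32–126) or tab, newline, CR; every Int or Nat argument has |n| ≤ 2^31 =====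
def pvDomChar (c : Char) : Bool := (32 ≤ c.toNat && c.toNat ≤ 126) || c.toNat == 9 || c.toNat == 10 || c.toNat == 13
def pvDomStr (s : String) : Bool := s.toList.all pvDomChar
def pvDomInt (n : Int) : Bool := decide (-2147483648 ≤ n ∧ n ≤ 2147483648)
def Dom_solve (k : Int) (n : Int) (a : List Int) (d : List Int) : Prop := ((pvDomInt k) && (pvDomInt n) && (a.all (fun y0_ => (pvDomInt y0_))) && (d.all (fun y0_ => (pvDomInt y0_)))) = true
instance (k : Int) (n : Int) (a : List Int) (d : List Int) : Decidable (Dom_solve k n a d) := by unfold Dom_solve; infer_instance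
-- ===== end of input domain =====

-- B replaces A's finishing greedy loop (pop minimum / bisect re-insert, r times) by one batch step:
-- every sequence emits its next r values in closed form, the emitted values are sorted once and the
-- r smallest are summed (objective: alternative algorithm, similar cost).

-- ===== PORT A =====
-- Python tuple comparison (y, i) < (y', i') — lexicographic
def pvTupLt (p q : Int × Int) : Bool := p.1 < q.1 || (p.1 == q.1 && p.2 < q.2)

-- 'calc' with its early return, looped over the indices of range(n)
def pvCalcLoop (a d : List Int) (y : Int) (is : List Int) (r : Int) : Int :=
  match is with
  | [] => r
  | i :: rest =>
    if PySem.List.pyGetD a i 0 < y then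
      let r' := r - PySem.Int.floordiv (y - PySem.List.pyGetD a i 0 + PySem.List.pyGetD d i 0 - 1) (PySem.List.pyGetD d i 0)
      if r' < 0 then r' else pvCalcLoop a d y rest r'
    else pvCalcLoop a d y rest r

def pvCalc (k n : Int) (a d : List Int) (y : Int) : Int :=
  pvCalcLoop a d y (PySem.List.pyRange 0 n 1) k

-- the 'while ok + 1 < ng' binary search of A
def pvBisA (k n : Int) (a d : List Int) (ok ng : Int) : Int :=
  if h : ok + 1 < ng then
    let mid := PySem.Int.floordiv (ok + ng) 2
    if pvCalc k n a d mid < 0 then pvBisA k n a d ok mid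
    else pvBisA k n a d mid ng
  else ok
termination_by (ng - ok).toNat
decreasing_by
  all_goals
    have hb := PySem.Int.floordiv_two_mid_bounds (lo := ok + 1) (hi := ng - 1) (by omega)
    have he : ok + 1 + (ng - 1) = ok + ng := by ring
    rw [he] at hb
    omega

-- A's phase-1 loop: state (ans, r, lst)
def pvPhase1 (k n : Int) (a d : List Int) (ok : Int) : Int × Int × List (Int × Int) :=
  (PySem.List.pyRange 0 n 1).foldl
    (fun st i =>
      if PySem.List.pyGetD a i 0 < ok then
        let x := PySem.Int.floordiv (ok - PySem.List.pyGetD a i 0 + PySem.List.pyGetD d i 0 - 1) (PySem.List.pyGetD d i 0)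
        (st.1 + (PySem.List.pyGetD a i 0 * x + PySem.Int.floordiv (PySem.List.pyGetD d i 0 * x * (x - 1)) 2),
         st.2.1 - x,
         st.2.2 ++ [(PySem.List.pyGetD a i 0 + PySem.List.pyGetD d i 0 * x, i)])
      else (st.1, st.2.1, st.2.2 ++ [(PySem.List.pyGetD a i 0, i)]))
    (0, k, [])

-- A's finishing loop: pop lst[0], add its value, re-insert the successor at bisect_left
-- (bisect.bisect_left on the sorted lst = first position whose element is not < v)
def pvGreedy (d : List Int) (r : Int) (lst : List (Int × Int)) (ans : Int) : Int :=
  if h : 0 < r then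
    match PySem.List.pop? lst 0 with
    | none => ans   -- Python raises IndexError here (pop from empty list); excluded by Pre_solve
    | some (p, rest) =>
      let v : Int × Int := (p.1 + PySem.List.pyGetD d p.2 0, p.2)
      let j : Nat := (rest.takeWhile (fun w => pvTupLt w v)).length
      pvGreedy d (r - 1) (PySem.List.insert rest (j : Int) v) (ans + p.1)
  else ans
termination_by r.toNat
decreasing_by omega

def solve (k : Int) (n : Int) (a : List Int) (d : List Int) : Int :=
  let ok := pvBisA k n a d 1 (10 ^ 20)
  let st := pvPhase1 k n a d ok
  pvGreedy d st.2.1 (PySem.List.sorted2 st.2.2 (fun p => p.1) (fun p => p.2)) st.1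

-- ===== PORT B =====
-- items taken from the sequence (ai, ai+di, …) to reach y
def pvSteps (y ai di : Int) : Int :=
  if ai < y then PySem.Int.floordiv (y - ai + di - 1) di else 0

def pvNeed (seqs : List (Int × Int)) (y : Int) : Int :=
  (seqs.map (fun p => pvSteps y p.1 p.2)).sum

-- B's binary search ('if need(mid) <= k: ok = mid else: ng = mid')
def pvBisB (k : Int) (seqs : List (Int × Int)) (ok ng : Int) : Int :=
  if h : ok + 1 < ng then
    let mid := PySem.Int.floordiv (ok + ng) 2
    if pvNeed seqs mid ≤ k then pvBisB k seqs mid ng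
    else pvBisB k seqs ok mid
  else ok
termination_by (ng - ok).toNat
decreasing_by
  all_goals
    have hb := PySem.Int.floordiv_two_mid_bounds (lo := ok + 1) (hi := ng - 1) (by omega)
    have he : ok + 1 + (ng - 1) = ok + ng := by ring
    rw [he] at hb
    omega

def solve_alt (k : Int) (n : Int) (a : List Int) (d : List Int) : Int :=
  let seqs := (PySem.List.pyRange 0 n 1).map (fun i => (PySem.List.pyGetD a i 0, PySem.List.pyGetD d i 0))
  let ok := pvBisB k seqs 1 (10 ^ 20)
  let ans := (seqs.map (fun p =>
      p.1 * pvSteps ok p.1 p.2 +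
      PySem.Int.floordiv (p.2 * pvSteps ok p.1 p.2 * (pvSteps ok p.1 p.2 - 1)) 2)).sum
  let r := k - pvNeed seqs ok
  if 0 < r then
    let vals := PySem.List.sorted
      (seqs.flatMap (fun p =>
        (PySem.List.pyRange 0 r 1).map (fun t => p.1 + p.2 * (pvSteps ok p.1 p.2 + t))))
      (fun v => v)
    ans + (PySem.List.slice vals none (some r)).sum
  else ans

-- ===== PRECONDITION & SPEC =====
-- Pre_ restricts to the task's natural domain: n ≤ len(a), len(d) (A raises IndexError when
-- 0 < n > len), positive steps d[i] ≥ 1 for the used i < n (d[i] = 0 raises ZeroDivisionError;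
-- d[i] < 0 makes the finishing loop pick from unboundedly decreasing sequences, where A usually
-- diverges and its value is accidental), and 0 < k → 0 < n (A pops from an empty list otherwise).
def Pre_solve (k : Int) (n : Int) (a : List Int) (d : List Int) : Prop :=
  n ≤ (a.length : Int) ∧ n ≤ (d.length : Int) ∧
  (∀ i : Nat, i < n.toNat → 1 ≤ d.getD i 0) ∧ (0 < k → 0 < n)
instance (k : Int) (n : Int) (a : List Int) (d : List Int) : Decidable (Pre_solve k n a d) := by
  unfold Pre_solve; infer_instance

def pvWitness_solve : Int × Int × List Int × List Int := (5, 3, [1, 2, 3], [1, 1, 2])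

def Spec_solve (k : Int) (n : Int) (a : List Int) (d : List Int) (out : Int) : Prop := out = solve_alt k n a d
instance (k : Int) (n : Int) (a : List Int) (d : List Int) (out : Int) : Decidable (Spec_solve k n a d out) := by unfold Spec_solve; infer_instance

-- ===== CLAIM (what is proved, stated in full; the proofs are below) =====
def Claim_equal_solve : Prop := ∀ (k : Int) (n : Int) (a : List Int) (d : List Int), Dom_solve k n a d → Pre_solve k n a d → Spec_solve k n a d (solve k n a d)

-- ===== LEMMAS AND PROOFS =====

-- proof-side helpers: lexicographic order, the emitted-value expansion, the lex sort
def pvLe (p q : Int × Int) : Prop := toLex p ≤ toLex q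
def pvDD (d : List Int) (p : Int × Int) : Int := d.getD p.2.toNat 0
def pvExpand (d : List Int) (m : Nat) (L : List (Int × Int)) : List (Int × Int) :=
  L.flatMap (fun p => (List.range m).map (fun t : Nat => (p.1 + pvDD d p * (t : Int), p.2)))
def pvSortL (M : List (Int × Int)) : List (Int × Int) := PySem.List.sorted M (fun p => toLex p)
def pvGood (d : List Int) (L : List (Int × Int)) : Prop := ∀ p ∈ L, 0 ≤ p.2 ∧ 1 ≤ pvDD d p

lemma pvTupLt_iff (p q : Int × Int) : pvTupLt p q = true ↔ toLex p < toLex q := by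
  simp [pvTupLt, Prod.Lex.lt_iff]

lemma pv_dropWhile_not_head {α : Type} (p : α → Bool) (l : List α) :
    ∀ hd rest, l.dropWhile p = hd :: rest → p hd = false := by
  induction l with
  | nil => intro hd rest h; simp at h
  | cons x xs ih =>
    intro hd rest h
    by_cases hx : p x
    · rw [List.dropWhile_cons_of_pos hx] at h; exact ih hd rest h
    · rw [List.dropWhile_cons_of_neg hx] at h
      cases h
      simpa using hx

-- (1) bisect-insert into a sorted list
lemma pvInsert_spec (v : Int × Int) (tl : List (Int × Int)) (hs : List.Pairwise pvLe tl) :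
    (PySem.List.insert tl (((tl.takeWhile (fun w => pvTupLt w v)).length : Nat) : Int) v).Perm (v :: tl) ∧
    List.Pairwise pvLe (PySem.List.insert tl (((tl.takeWhile (fun w => pvTupLt w v)).length : Nat) : Int) v) := by
  set t1 := tl.takeWhile (fun w => pvTupLt w v) with ht1
  set t2 := tl.dropWhile (fun w => pvTupLt w v) with ht2
  have hsplit : t1 ++ t2 = tl := List.takeWhile_append_dropWhile
  have hj : t1.length ≤ tl.length := (List.takeWhile_prefix _).length_le
  rw [PySem.List.insert_natCast _ _ _ hj]
  have htake : tl.take t1.length = t1 := by rw [← hsplit, List.take_left]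
  have hdrop : tl.drop t1.length = t2 := by rw [← hsplit, List.drop_left]
  rw [htake, hdrop]
  have hpw : List.Pairwise pvLe (t1 ++ t2) := by rw [hsplit]; exact hs
  rw [List.pairwise_append] at hpw
  have hvall : ∀ w ∈ t2, pvLe v w := by
    cases hD : t2 with
    | nil => intro w hw; cases hw
    | cons hd rest =>
      have hDW : tl.dropWhile (fun w => pvTupLt w v) = hd :: rest := ht2.symm.trans hD
      have hhd : pvTupLt hd v = false := pv_dropWhile_not_head _ tl hd rest hDW
      have hvh : pvLe v hd := by
        unfold pvLe
        by_contra hcon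
        push_neg at hcon
        have : pvTupLt hd v = true := (pvTupLt_iff _ _).2 hcon
        rw [hhd] at this
        exact absurd this (by simp)
      intro w hw
      rcases List.mem_cons.1 hw with rfl | hw2
      · exact hvh
      · exact le_trans hvh ((List.pairwise_cons.1 (hD ▸ hpw.2.1)).1 w hw2)
  constructor
  · calc (t1 ++ v :: t2).Perm (v :: (t1 ++ t2)) := List.perm_middle
      _ = v :: tl := by rw [hsplit]
  · rw [List.pairwise_append]
    refine ⟨hpw.1, ?_, ?_⟩
    · rw [List.pairwise_cons]
      exact ⟨hvall, hpw.2.1⟩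
    · intro x hx w hw
      have hxmem : x ∈ tl.takeWhile (fun w => pvTupLt w v) := ht1 ▸ hx
      have hxb := List.mem_takeWhile_imp hxmem
      simp only [] at hxb
      have hxlt : toLex x < toLex v := (pvTupLt_iff x v).1 (by simpa using hxb)
      rcases List.mem_cons.1 hw with rfl | hw2
      · exact le_of_lt hxlt
      · exact hpw.2.2 x hx w hw2

-- (2) membership facts for the expansion
lemma pvExpand_mem {d : List Int} {m : Nat} {L : List (Int × Int)} {x : Int × Int}
    (hx : x ∈ pvExpand d m L) :
    ∃ p ∈ L, ∃ t : Nat, t < m ∧ x = (p.1 + pvDD d p * (t : Int), p.2) := by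
  simp only [pvExpand, List.mem_flatMap, List.mem_map, List.mem_range] at hx
  obtain ⟨p, hp, t, ht, rfl⟩ := hx
  exact ⟨p, hp, t, ht, rfl⟩

lemma pvExpand_snd_mem {d : List Int} {m : Nat} {L : List (Int × Int)} {x : Int × Int}
    (hx : x ∈ pvExpand d m L) : x.2 ∈ L.map Prod.snd := by
  obtain ⟨p, hp, t, _, rfl⟩ := pvExpand_mem hx
  exact List.mem_map.2 ⟨p, hp, rfl⟩

-- (3) the expansion has no duplicate pairs
lemma pvExpand_nodup (d : List Int) (m : Nat) :
    ∀ (L : List (Int × Int)), (L.map Prod.snd).Nodup → pvGood d L → (pvExpand d m L).Nodup := by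
  intro L
  induction L with
  | nil => intro _ _; simp [pvExpand]
  | cons p tl ih =>
    intro hnd hg
    have hD : 1 ≤ pvDD d p := (hg p (List.mem_cons_self)).2
    rw [List.map_cons, List.nodup_cons] at hnd
    have hblock : ((List.range m).map (fun t : Nat => (p.1 + pvDD d p * (t : Int), p.2))).Nodup := by
      refine List.Nodup.map ?_ (List.nodup_range)
      intro t t' h
      have h1 := congrArg Prod.fst h
      simp only at h1
      have : (t : Int) = (t' : Int) := by
        have hD0 : pvDD d p ≠ 0 := by omega
        have := mul_left_cancel₀ hD0 (by omega : pvDD d p * (t : Int) = pvDD d p * (t' : Int))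
        exact this
      exact_mod_cast this
    have hrest : (pvExpand d m tl).Nodup :=
      ih hnd.2 (fun q hq => hg q (List.mem_cons_of_mem _ hq))
    show (((List.range m).map (fun t : Nat => (p.1 + pvDD d p * (t : Int), p.2))) ++ pvExpand d m tl).Nodup
    refine List.Nodup.append hblock hrest ?_
    intro x hx hx'
    have h1 : x.2 = p.2 := by
      rcases List.mem_map.1 hx with ⟨t, _, rfl⟩; rfl
    have h2 : x.2 ∈ tl.map Prod.snd := pvExpand_snd_mem hx'
    rw [h1] at h2
    exact hnd.1 h2

-- (4) strict sortedness of the sorted list of a duplicate-free list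
lemma pvSortL_pairwise_lt (M : List (Int × Int)) (hnd : M.Nodup) :
    List.Pairwise (fun a b => toLex a < toLex b) (pvSortL M) := by
  have h1 : List.Pairwise (fun a b : Int × Int => toLex a ≤ toLex b) (pvSortL M) :=
    PySem.List.sorted_pairwise M (fun p => toLex p)
  have h2 : (pvSortL M).Nodup := (PySem.List.sorted_perm M (fun p => toLex p) false).symm.nodup hnd
  exact (h1.and h2).imp (fun hab => lt_of_le_of_ne hab.1 (fun h => hab.2 (toLex.injective h)))

-- (5) sorting a list whose head is the strict minimum
lemma pvSortL_cons_min (p : Int × Int) (M0 : List (Int × Int)) (hnd : (p :: M0).Nodup)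
    (hmin : ∀ q ∈ M0, toLex p < toLex q) : pvSortL (p :: M0) = p :: pvSortL M0 := by
  apply PySem.List.sorted_eq_of_perm_of_pairwise_lt
  · exact (PySem.List.sorted_perm M0 (fun p => toLex p) false).cons p
  · rw [List.pairwise_cons]
    refine ⟨?_, pvSortL_pairwise_lt M0 (List.nodup_cons.1 hnd).2⟩
    intro q hq
    exact hmin q ((PySem.List.mem_sorted M0 _ false q).1 hq)

-- (6) in a strictly sorted list, takeWhile (< x) collects exactly the elements < x
lemma pvTakeWhile_length_eq_countP (x : Int × Int) :
    ∀ (T : List (Int × Int)), List.Pairwise (fun a b => toLex a < toLex b) T →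
    (T.takeWhile (fun w => decide (toLex w < toLex x))).length =
      T.countP (fun w => decide (toLex w < toLex x)) := by
  intro T
  induction T with
  | nil => simp
  | cons h t ih =>
    intro hpw
    rw [List.pairwise_cons] at hpw
    by_cases hh : toLex h < toLex x
    · rw [List.takeWhile_cons_of_pos (by simpa using hh), List.countP_cons_of_pos (p := fun w => decide (toLex w < toLex x)) (by simpa using hh)]
      simp [ih hpw.2]
    · rw [List.takeWhile_cons_of_neg (by simpa using hh), List.countP_cons_of_neg (p := fun w => decide (toLex w < toLex x)) (by simpa using hh)]
      simp only [List.length_nil]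
      symm
      rw [List.countP_eq_zero]
      intro w hw
      have : toLex h < toLex w := hpw.1 w hw
      simp only [decide_eq_true_eq]
      intro hcon
      exact hh (lt_trans this hcon)

-- (7) appending one element with at least m smaller ones does not change the m smallest
lemma pvTake_sort_append_singleton (m : Nat) (S : List (Int × Int)) (x : Int × Int)
    (hnd : (S ++ [x]).Nodup)
    (hc : m ≤ S.countP (fun w => decide (toLex w < toLex x))) :
    (pvSortL (S ++ [x])).take m = (pvSortL S).take m := by
  have hndS : S.Nodup := (List.nodup_append.1 hnd).1
  have hxS : x ∉ S := by
    have h2 := hnd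
    simp [List.nodup_append] at h2
    tauto
  set T := pvSortL S with hT
  have hTpw : List.Pairwise (fun a b => toLex a < toLex b) T := pvSortL_pairwise_lt S hndS
  set pb := fun w : Int × Int => decide (toLex w < toLex x) with hpb
  set T1 := T.takeWhile pb with hT1
  set T2 := T.dropWhile pb with hT2
  have hsplit : T1 ++ T2 = T := List.takeWhile_append_dropWhile
  have hmemT : ∀ w ∈ T, w ∈ S := fun w hw => (PySem.List.mem_sorted S _ false w).1 hw
  have hx2 : ∀ w ∈ T2, toLex x < toLex w := by
    intro w hw
    have hwT : w ∈ T := by rw [← hsplit]; exact List.mem_append_right _ hw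
    have hwx : w ≠ x := fun h => hxS (h ▸ hmemT w hwT)
    -- first element of T2 is not < x; later ones are even bigger
    have hnotlt : ¬ toLex w < toLex x := by
      cases hD : T2 with
      | nil => rw [hD] at hw; cases hw
      | cons hd rest =>
        have hDW : T.dropWhile pb = hd :: rest := hT2.symm.trans hD
        have hhd : pb hd = false := pv_dropWhile_not_head pb T hd rest hDW
        have hhd' : ¬ toLex hd < toLex x := by simpa [hpb] using hhd
        rw [hD] at hw
        rcases List.mem_cons.1 hw with rfl | hw2
        · exact hhd'
        · have hpwT2 : List.Pairwise (fun a b => toLex a < toLex b) T2 := by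
            refine List.Pairwise.sublist ?_ hTpw
            rw [← hsplit]; exact List.sublist_append_right _ _
          have := (List.pairwise_cons.1 (hD ▸ hpwT2)).1 w hw2
          intro hcon
          exact hhd' (lt_trans this hcon)
    rcases lt_trichotomy (toLex x) (toLex w) with h | h | h
    · exact h
    · exact absurd (toLex.injective h.symm) hwx
    · exact absurd h hnotlt
  have hsorted : pvSortL (S ++ [x]) = T1 ++ x :: T2 := by
    apply PySem.List.sorted_eq_of_perm_of_pairwise_lt
    · have p1 : (T1 ++ x :: T2).Perm (x :: (T1 ++ T2)) := List.perm_middle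
      rw [hsplit] at p1
      have p2 : (x :: T).Perm (x :: S) :=
        ((PySem.List.sorted_perm S (fun p => toLex p) false)).cons x
      exact p1.trans (p2.trans (List.perm_append_singleton x S).symm)
    · rw [List.pairwise_append]
      refine ⟨?_, ?_, ?_⟩
      · refine List.Pairwise.sublist ?_ hTpw
        rw [← hsplit]; exact List.sublist_append_left _ _
      · rw [List.pairwise_cons]
        refine ⟨hx2, ?_⟩
        refine List.Pairwise.sublist ?_ hTpw
        rw [← hsplit]; exact List.sublist_append_right _ _
      · intro a ha b hb
        have hamem : a ∈ T.takeWhile pb := hT1 ▸ ha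
        have hax := List.mem_takeWhile_imp hamem
        have hax' : toLex a < toLex x := by simpa [hpb] using hax
        rcases List.mem_cons.1 hb with rfl | hb2
        · exact hax'
        · have hpwsplit := List.pairwise_append.1 (hsplit ▸ hTpw)
          exact hpwsplit.2.2 a ha b hb2
  have hlen : m ≤ T1.length := by
    rw [hT1, pvTakeWhile_length_eq_countP x T hTpw]
    have hcnt2 : T.countP (fun w => decide (toLex w < toLex x)) =
        S.countP (fun w => decide (toLex w < toLex x)) :=
      (PySem.List.sorted_perm S (fun p => toLex p) false).countP_eq _
    rw [← hpb] at hcnt2 ⊢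
    omega
  rw [hsorted, List.take_append_of_le_length hlen, ← hsplit,
    List.take_append_of_le_length hlen]

-- (8) appending any number of such elements
lemma pvTake_sort_append (m : Nat) (M1 : List (Int × Int)) :
    ∀ (tops : List (Int × Int)), (M1 ++ tops).Nodup →
    (∀ x ∈ tops, m ≤ M1.countP (fun w => decide (toLex w < toLex x))) →
    (pvSortL (M1 ++ tops)).take m = (pvSortL M1).take m := by
  intro tops
  induction tops using List.reverseRecOn with
  | nil => simp
  | append_singleton ts x ih =>
    intro hnd hcnt
    have hsub : (M1 ++ ts).Sublist (M1 ++ (ts ++ [x])) :=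
      List.Sublist.append_left (List.sublist_append_left ts [x]) M1
    have hnd' : (M1 ++ ts).Nodup := List.Nodup.sublist hsub hnd
    have step : (pvSortL ((M1 ++ ts) ++ [x])).take m = (pvSortL (M1 ++ ts)).take m := by
      apply pvTake_sort_append_singleton m (M1 ++ ts) x (by rwa [List.append_assoc])
      calc m ≤ M1.countP (fun w => decide (toLex w < toLex x)) :=
            hcnt x (List.mem_append_right ts (List.mem_singleton.2 rfl))
        _ ≤ (M1 ++ ts).countP (fun w => decide (toLex w < toLex x)) :=
            (List.sublist_append_left M1 ts).countP_le
    rw [← List.append_assoc, step]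
    exact ih hnd' (fun y hy => hcnt y (List.mem_append_left _ hy))

-- (9) splitting the last emitted value off every sequence
lemma pvFlatMap_snoc_perm {α β : Type} (l : List α) (g : α → List β) (h : α → β) :
    (l.flatMap (fun q => g q ++ [h q])).Perm (l.flatMap g ++ l.map h) := by
  induction l with
  | nil => simp
  | cons q t ih =>
    simp only [List.flatMap_cons, List.map_cons]
    have p1 : ((g q ++ [h q]) ++ t.flatMap (fun q => g q ++ [h q])).Perm
        ((g q ++ [h q]) ++ (t.flatMap g ++ t.map h)) := List.Perm.append_left _ ih
    have p2 : ((g q ++ [h q]) ++ (t.flatMap g ++ t.map h)) =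
        g q ++ ((h q) :: (t.flatMap g ++ t.map h)) := by
      rw [List.append_assoc]; rfl
    have p3 : ((h q) :: (t.flatMap g ++ t.map h)).Perm (t.flatMap g ++ (h q) :: t.map h) :=
      List.perm_middle.symm
    have p4 : (g q ++ (t.flatMap g ++ (h q) :: t.map h)) =
        (g q ++ t.flatMap g) ++ ((h q) :: t.map h) := by rw [List.append_assoc]
    have p5 := List.Perm.append_left (g q) p3
    rw [p4] at p5
    exact p1.trans (p2 ▸ p5)

-- THE CORE: the greedy loop sums the m smallest emitted values
theorem pvGreedy_eq (d : List Int) : ∀ (m : Nat) (L : List (Int × Int)) (ans : Int),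
    List.Pairwise pvLe L → (L.map Prod.snd).Nodup → pvGood d L →
    pvGreedy d (m : Int) L ans =
      ans + (((pvSortL (pvExpand d m L)).take m).map Prod.fst).sum := by
  intro m
  induction m with
  | zero =>
    intro L ans _ _ _
    rw [pvGreedy.eq_def]
    simp
  | succ m ih =>
    intro L ans hpw hnd hg
    cases L with
    | nil =>
      rw [pvGreedy.eq_def]
      have hpop : PySem.List.pop? ([] : List (Int × Int)) 0 = none := rfl
      rw [dif_pos (by exact_mod_cast Nat.succ_pos m), hpop]
      simp [pvExpand, pvSortL, PySem.List.sorted]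
    | cons p tl =>
      have hp2 := hg p List.mem_cons_self
      have hpy : PySem.List.pyGetD d p.2 0 = pvDD d p := by
        have h1 := PySem.List.pyGetD_natCast (xs := d) (n := p.2.toNat) (d := 0)
        rw [Int.toNat_of_nonneg hp2.1] at h1
        rw [h1]; rfl
      set D := pvDD d p with hD
      set v : Int × Int := (p.1 + D, p.2) with hv
      have hstep : pvGreedy d ((m + 1 : Nat) : Int) (p :: tl) ans =
          pvGreedy d (((m + 1 : Nat) : Int) - 1)
            (PySem.List.insert tl (((tl.takeWhile (fun w => pvTupLt w v)).length : Nat) : Int) v)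
            (ans + p.1) := by
        rw [pvGreedy.eq_def, dif_pos (by exact_mod_cast Nat.succ_pos m),
          PySem.List.pop?_zero_cons]
        show pvGreedy d _ (PySem.List.insert tl
          (((tl.takeWhile (fun w => pvTupLt w (p.1 + PySem.List.pyGetD d p.2 0, p.2))).length : Nat) : Int)
          (p.1 + PySem.List.pyGetD d p.2 0, p.2)) _ = _
        rw [hpy]
      have hm1 : ((m + 1 : Nat) : Int) - 1 = ((m : Nat) : Int) := by push_cast; ring
      set L' := PySem.List.insert tl (((tl.takeWhile (fun w => pvTupLt w v)).length : Nat) : Int) v with hL'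
      have htl : List.Pairwise pvLe tl := (List.pairwise_cons.1 hpw).2
      have hins := pvInsert_spec v tl htl
      -- hypotheses for the inductive call
      have hmapsnd : (L'.map Prod.snd).Perm ((p :: tl).map Prod.snd) := by
        have := hins.1.map Prod.snd
        simpa using this
      have hnd' : (L'.map Prod.snd).Nodup := hmapsnd.symm.nodup hnd
      have hg' : pvGood d L' := by
        intro q hq
        rcases List.mem_cons.1 (hins.1.mem_iff.1 hq) with rfl | hq2
        · exact ⟨hp2.1, hp2.2⟩
        · exact hg q (List.mem_cons_of_mem _ hq2)
      have hIH := ih L' (ans + p.1) hins.2 hnd' hg'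
      rw [hstep, hm1, hIH]
      -- now the multiset bookkeeping
      set seqTail := (List.range m).map (fun t : Nat => (v.1 + pvDD d v * (t : Int), v.2)) with hseq
      set M0 := seqTail ++ pvExpand d (m + 1) tl with hM0
      have hMeq : pvExpand d (m + 1) (p :: tl) = p :: M0 := by
        show ((List.range (m + 1)).map (fun t : Nat => (p.1 + pvDD d p * (t : Int), p.2))) ++
            pvExpand d (m + 1) tl = p :: M0
        rw [List.range_succ_eq_map, List.map_cons, List.map_map]
        have h1 : (p.1 + pvDD d p * ((0 : Nat) : Int), p.2) = p := by simp
        have h2 : (List.range m).map ((fun t : Nat => (p.1 + pvDD d p * (t : Int), p.2)) ∘ Nat.succ) =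
            seqTail := by
          apply List.map_congr_left
          intro t _
          show (p.1 + pvDD d p * ((t + 1 : Nat) : Int), p.2) = (v.1 + pvDD d v * (t : Int), v.2)
          have : pvDD d v = pvDD d p := rfl
          rw [this, hv]
          refine Prod.ext ?_ rfl
          show p.1 + pvDD d p * ((t + 1 : Nat) : Int) = p.1 + pvDD d p + pvDD d p * (t : Int)
          push_cast; ring
        rw [h1, h2, hM0, List.cons_append]
      have hMnd : (pvExpand d (m + 1) (p :: tl)).Nodup := pvExpand_nodup d (m + 1) _ hnd hg
      have hM0nd : M0.Nodup := by
        have := hMeq ▸ hMnd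
        exact (List.nodup_cons.1 this).2
      have hp2nmem : p.2 ∉ tl.map Prod.snd := by
        rw [List.map_cons, List.nodup_cons] at hnd
        exact hnd.1
      have hmin : ∀ q ∈ M0, toLex p < toLex q := by
        intro q hq
        rcases List.mem_append.1 hq with hq1 | hq2
        · rcases List.mem_map.1 (hseq ▸ hq1) with ⟨t, _, rfl⟩
          rw [Prod.Lex.lt_iff]
          left
          show p.1 < v.1 + pvDD d v * (t : Int)
          have hnn : 0 ≤ pvDD d v * (t : Int) := by
            have : (1 : Int) ≤ pvDD d v := hp2.2
            positivity
          have : p.1 < v.1 := by rw [hv]; have := hp2.2; omega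
          omega
        · obtain ⟨w, hw, t, _, rfl⟩ := pvExpand_mem hq2
          have hpw' : pvLe p w := (List.pairwise_cons.1 hpw).1 w hw
          have hwq : toLex w ≤ toLex (w.1 + pvDD d w * (t : Int), w.2) := by
            rw [Prod.Lex.le_iff]
            have hDw : (1 : Int) ≤ pvDD d w := (hg w (List.mem_cons_of_mem _ hw)).2
            have hnn : 0 ≤ pvDD d w * (t : Int) := by positivity
            rcases eq_or_lt_of_le (by omega : w.1 ≤ w.1 + pvDD d w * (t : Int)) with h | h
            · right; exact ⟨by simpa using h, le_refl _⟩
            · left; simpa using h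
          have hle : toLex p ≤ toLex (w.1 + pvDD d w * (t : Int), w.2) := le_trans hpw' hwq
          have hne : p ≠ (w.1 + pvDD d w * (t : Int), w.2) := by
            intro hcon
            apply hp2nmem
            rw [hcon]
            exact List.mem_map.2 ⟨w, hw, rfl⟩
          exact lt_of_le_of_ne hle (fun h => hne (toLex.injective h))
      have hsortM : pvSortL (pvExpand d (m + 1) (p :: tl)) = p :: pvSortL M0 := by
        rw [hMeq]
        exact pvSortL_cons_min p M0 (hMeq ▸ hMnd) hmin
      -- M0 is (expand of L') plus the lost top elements
      set tops := tl.map (fun q => (q.1 + pvDD d q * (m : Int), q.2)) with htops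
      have hpermM0 : M0.Perm (pvExpand d m L' ++ tops) := by
        have hpart1 : (pvExpand d m L').Perm (pvExpand d m (v :: tl)) :=
          List.Perm.flatMap hins.1 (fun a _ => List.Perm.refl _)
        have hexp_cons : pvExpand d m (v :: tl) = seqTail ++ pvExpand d m tl := rfl
        have hpart2 : (pvExpand d (m + 1) tl).Perm (pvExpand d m tl ++ tops) := by
          have hfg : (fun q : Int × Int => (List.range (m + 1)).map (fun t : Nat => (q.1 + pvDD d q * (t : Int), q.2))) =
              (fun q : Int × Int => ((List.range m).map (fun t : Nat => (q.1 + pvDD d q * (t : Int), q.2))) ++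
                [(q.1 + pvDD d q * (m : Int), q.2)]) := by
            funext q
            rw [List.range_succ, List.map_append]
            rfl
          have hfun : pvExpand d (m + 1) tl =
              tl.flatMap (fun q => ((List.range m).map (fun t : Nat => (q.1 + pvDD d q * (t : Int), q.2))) ++
                [(q.1 + pvDD d q * (m : Int), q.2)]) := by
            unfold pvExpand
            rw [hfg]
          rw [hfun]
          exact pvFlatMap_snoc_perm tl _ _
        have c1 : M0.Perm (seqTail ++ (pvExpand d m tl ++ tops)) := List.Perm.append_left _ hpart2
        have c2 : (seqTail ++ (pvExpand d m tl ++ tops)) = pvExpand d m (v :: tl) ++ tops := by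
          rw [← List.append_assoc, ← hexp_cons]
        have c3 : (pvExpand d m (v :: tl) ++ tops).Perm (pvExpand d m L' ++ tops) :=
          List.Perm.append_right tops hpart1.symm
        exact (c2 ▸ c1).trans c3
      have hsort0 : pvSortL M0 = pvSortL (pvExpand d m L' ++ tops) :=
        PySem.List.sorted_eq_sorted_of_perm _ _ _ toLex.injective hpermM0
      have hcnt : ∀ x ∈ tops, m ≤ (pvExpand d m L').countP (fun w => decide (toLex w < toLex x)) := by
        intro x hx
        rcases List.mem_map.1 (htops ▸ hx) with ⟨q, hq, rfl⟩
        have hqL' : q ∈ L' := hins.1.mem_iff.2 (List.mem_cons_of_mem _ hq)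
        obtain ⟨l1, l2, hLsplit⟩ := List.append_of_mem hqL'
        have hDq : (1 : Int) ≤ pvDD d q := (hg q (List.mem_cons_of_mem _ hq)).2
        have hblocksub : ((List.range m).map (fun t : Nat => (q.1 + pvDD d q * (t : Int), q.2))).Sublist
            (pvExpand d m L') := by
          rw [hLsplit]
          unfold pvExpand
          rw [List.flatMap_append, List.flatMap_cons]
          exact ((List.sublist_append_left _ _).trans (List.sublist_append_right _ _))
        have hblockcnt : ((List.range m).map (fun t : Nat => (q.1 + pvDD d q * (t : Int), q.2))).countP
            (fun w => decide (toLex w < toLex (q.1 + pvDD d q * (m : Int), q.2))) = m := by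
          rw [List.countP_eq_length.2, List.length_map, List.length_range]
          intro w hw
          rcases List.mem_map.1 hw with ⟨t, htm, rfl⟩
          have htm' : t < m := List.mem_range.1 htm
          simp only [decide_eq_true_eq]
          rw [Prod.Lex.lt_iff]
          left
          show q.1 + pvDD d q * (t : Int) < q.1 + pvDD d q * (m : Int)
          have : (t : Int) < (m : Int) := by exact_mod_cast htm'
          nlinarith
        calc m = _ := hblockcnt.symm
          _ ≤ _ := hblocksub.countP_le
      have hndM1tops : (pvExpand d m L' ++ tops).Nodup := hpermM0.nodup hM0nd
      have htake : (pvSortL (pvExpand d m L' ++ tops)).take m = (pvSortL (pvExpand d m L')).take m :=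
        pvTake_sort_append m _ tops hndM1tops hcnt
      rw [hsortM, List.take_succ_cons, List.map_cons, List.sum_cons, hsort0, htake]
      ring

lemma pvSteps_nonneg (y ai di : Int) (h : ai < y → 1 ≤ di) : 0 ≤ pvSteps y ai di := by
  unfold pvSteps
  split_ifs with hlt
  · have hdi := h hlt
    have h1 : (1 : Int) ≤ PySem.Int.floordiv (y - ai + di - 1) di :=
      (PySem.Int.le_floordiv_iff_mul_le (by omega)).2 (by omega)
    omega
  · exact le_refl _

lemma pvCalcLoop_spec (a d : List Int) (y : Int) (is : List Int) (r : Int)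
    (h : ∀ i ∈ is, PySem.List.pyGetD a i 0 < y → 1 ≤ PySem.List.pyGetD d i 0) :
    (pvCalcLoop a d y is r < 0 ↔
      r - (is.map (fun i => pvSteps y (PySem.List.pyGetD a i 0) (PySem.List.pyGetD d i 0))).sum < 0) ∧
    (0 ≤ r - (is.map (fun i => pvSteps y (PySem.List.pyGetD a i 0) (PySem.List.pyGetD d i 0))).sum →
      pvCalcLoop a d y is r =
      r - (is.map (fun i => pvSteps y (PySem.List.pyGetD a i 0) (PySem.List.pyGetD d i 0))).sum) := by
  induction is generalizing r with
  | nil => simp [pvCalcLoop]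
  | cons i rest ih =>
    have hrest : ∀ j ∈ rest, PySem.List.pyGetD a j 0 < y → 1 ≤ PySem.List.pyGetD d j 0 :=
      fun j hj => h j (List.mem_cons_of_mem _ hj)
    have hsum0 : 0 ≤ ((rest.map (fun i => pvSteps y (PySem.List.pyGetD a i 0) (PySem.List.pyGetD d i 0))).sum) := by
      apply List.sum_nonneg
      intro x hx
      simp only [List.mem_map] at hx
      obtain ⟨j, hj, rfl⟩ := hx
      exact pvSteps_nonneg _ _ _ (hrest j hj)
    by_cases hlt : PySem.List.pyGetD a i 0 < y
    · have hstep : pvSteps y (PySem.List.pyGetD a i 0) (PySem.List.pyGetD d i 0) =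
        PySem.Int.floordiv (y - PySem.List.pyGetD a i 0 + PySem.List.pyGetD d i 0 - 1) (PySem.List.pyGetD d i 0) := by
        simp [pvSteps, hlt]
      set t := PySem.Int.floordiv (y - PySem.List.pyGetD a i 0 + PySem.List.pyGetD d i 0 - 1) (PySem.List.pyGetD d i 0) with ht
      have hunf : pvCalcLoop a d y (i :: rest) r =
          (if PySem.List.pyGetD a i 0 < y then
            (if r - PySem.Int.floordiv (y - PySem.List.pyGetD a i 0 + PySem.List.pyGetD d i 0 - 1) (PySem.List.pyGetD d i 0) < 0 then
              r - PySem.Int.floordiv (y - PySem.List.pyGetD a i 0 + PySem.List.pyGetD d i 0 - 1) (PySem.List.pyGetD d i 0)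
            else pvCalcLoop a d y rest (r - PySem.Int.floordiv (y - PySem.List.pyGetD a i 0 + PySem.List.pyGetD d i 0 - 1) (PySem.List.pyGetD d i 0)))
          else pvCalcLoop a d y rest r) := rfl
      rw [hunf, if_pos hlt]
      simp only [List.map_cons, List.sum_cons, hstep]
      by_cases hneg : r - t < 0
      · rw [if_pos hneg]
        constructor
        · constructor
          · intro _; omega
          · intro _; exact hneg
        · intro habs; omega
      · rw [if_neg hneg]
        have := ih (r - t) hrest
        constructor
        · rw [this.1]; constructor <;> intro <;> omega
        · intro h0
          rw [this.2 (by omega)]; ring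
    · have hstep : pvSteps y (PySem.List.pyGetD a i 0) (PySem.List.pyGetD d i 0) = 0 := by
        simp [pvSteps, hlt]
      have hunf : pvCalcLoop a d y (i :: rest) r =
          (if PySem.List.pyGetD a i 0 < y then
            (if r - PySem.Int.floordiv (y - PySem.List.pyGetD a i 0 + PySem.List.pyGetD d i 0 - 1) (PySem.List.pyGetD d i 0) < 0 then
              r - PySem.Int.floordiv (y - PySem.List.pyGetD a i 0 + PySem.List.pyGetD d i 0 - 1) (PySem.List.pyGetD d i 0)
            else pvCalcLoop a d y rest (r - PySem.Int.floordiv (y - PySem.List.pyGetD a i 0 + PySem.List.pyGetD d i 0 - 1) (PySem.List.pyGetD d i 0)))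
          else pvCalcLoop a d y rest r) := rfl
      rw [hunf, if_neg hlt]
      simp only [List.map_cons, List.sum_cons, hstep, zero_add]
      exact ih r hrest

lemma pv_range_zip {β : Type} (a d : List Int) (m : Nat) (f : Int → Int → β)
    (ha : m ≤ a.length) (hd : m ≤ d.length) :
    (List.range m).map (fun j => f (a.getD j 0) (d.getD j 0)) =
    ((a.take m).zip (d.take m)).map (fun p => f p.1 p.2) := by
  apply List.ext_getElem
  · simp [ha, hd]
  · intro i h1 h2
    have him : i < m := by simpa using h1
    simp [List.getElem_zip, List.getElem_take, List.getD_eq_getElem?_getD,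
      List.getElem?_eq_getElem (by omega : i < a.length),
      List.getElem?_eq_getElem (by omega : i < d.length)]

lemma pvBis_eq (k n : Int) (a d : List Int) (seqs : List (Int × Int))
    (hsign : ∀ y, pvCalc k n a d y < 0 ↔ ¬ pvNeed seqs y ≤ k) :
    ∀ N ok ng, (ng - ok).toNat = N → pvBisA k n a d ok ng = pvBisB k seqs ok ng := by
  intro N
  induction N using Nat.strong_induction_on with
  | _ N ih =>
    intro ok ng hN
    rw [pvBisA.eq_def, pvBisB.eq_def]
    by_cases h : ok + 1 < ng
    · rw [dif_pos h, dif_pos h]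
      have hb := PySem.Int.floordiv_two_mid_bounds (lo := ok + 1) (hi := ng - 1) (by omega)
      have he : ok + 1 + (ng - 1) = ok + ng := by ring
      rw [he] at hb
      set mid := PySem.Int.floordiv (ok + ng) 2 with hm
      by_cases hc : pvNeed seqs mid ≤ k
      · rw [if_neg (by rw [hsign]; exact not_not_intro hc), if_pos hc]
        exact ih (ng - mid).toNat (by omega) mid ng rfl
      · rw [if_pos ((hsign mid).2 hc), if_neg hc]
        exact ih (mid - ok).toNat (by omega) ok mid rfl
    · rw [dif_neg h, dif_neg h]

lemma pvPhase1_spec (k n : Int) (a d : List Int) (ok : Int)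
    (ha : n ≤ (a.length : Int)) (hd : n ≤ (d.length : Int)) :
    pvPhase1 k n a d ok =
      ((((a.take n.toNat).zip (d.take n.toNat)).map (fun p =>
          p.1 * pvSteps ok p.1 p.2 +
          PySem.Int.floordiv (p.2 * pvSteps ok p.1 p.2 * (pvSteps ok p.1 p.2 - 1)) 2)).sum,
       k - pvNeed ((a.take n.toNat).zip (d.take n.toNat)) ok,
       (List.range n.toNat).map (fun j =>
         (a.getD j 0 + d.getD j 0 * pvSteps ok (a.getD j 0) (d.getD j 0), (j : Int)))) := by
  have hm1 : n.toNat ≤ a.length := by omega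
  have hm2 : n.toNat ≤ d.length := by omega
  unfold pvPhase1
  rw [PySem.List.pyRange_one]
  simp only [zero_add, sub_zero]
  rw [List.foldl_map]
  rw [PySem.List.foldl_congr_mem _ _
    (fun (st : Int × Int × List (Int × Int)) (j : Nat) =>
      (st.1 + (a.getD j 0 * pvSteps ok (a.getD j 0) (d.getD j 0) +
        PySem.Int.floordiv (d.getD j 0 * pvSteps ok (a.getD j 0) (d.getD j 0) * (pvSteps ok (a.getD j 0) (d.getD j 0) - 1)) 2),
       st.2.1 - pvSteps ok (a.getD j 0) (d.getD j 0),
       st.2.2 ++ [(a.getD j 0 + d.getD j 0 * pvSteps ok (a.getD j 0) (d.getD j 0), (j : Int))])) _ ?hpt]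
  case hpt =>
    intro st j hj
    simp only [PySem.List.pyGetD_natCast, pvSteps]
    by_cases hlt : a.getD j 0 < ok
    · simp only [if_pos hlt]
    · have hz : PySem.Int.floordiv 0 2 = 0 := by
        rw [PySem.Int.floordiv_eq_ediv_of_pos (by omega)]; simp
      simp only [if_neg hlt]
      simp [hz]
  rw [PySem.List.foldl_prod_mk
    (f := fun (s : Int) (j : Nat) => s + (a.getD j 0 * pvSteps ok (a.getD j 0) (d.getD j 0) +
        PySem.Int.floordiv (d.getD j 0 * pvSteps ok (a.getD j 0) (d.getD j 0) * (pvSteps ok (a.getD j 0) (d.getD j 0) - 1)) 2))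
    (g := fun (s : Int × List (Int × Int)) (j : Nat) =>
      (s.1 - pvSteps ok (a.getD j 0) (d.getD j 0),
       s.2 ++ [(a.getD j 0 + d.getD j 0 * pvSteps ok (a.getD j 0) (d.getD j 0), (j : Int))]))]
  rw [PySem.List.foldl_prod_mk
    (f := fun (s : Int) (j : Nat) => s - pvSteps ok (a.getD j 0) (d.getD j 0))
    (g := fun (s : List (Int × Int)) (j : Nat) =>
      s ++ [(a.getD j 0 + d.getD j 0 * pvSteps ok (a.getD j 0) (d.getD j 0), (j : Int))])]
  refine Prod.ext ?_ (Prod.ext ?_ ?_)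
  · show List.foldl _ (0 : Int) _ = _
    rw [PySem.List.foldl_add]
    rw [pv_range_zip a d n.toNat (fun ai di => ai * pvSteps ok ai di +
      PySem.Int.floordiv (di * pvSteps ok ai di * (pvSteps ok ai di - 1)) 2) hm1 hm2]
    simp
  · show List.foldl _ k _ = _
    rw [PySem.List.foldl_congr_mem _ _
      (fun (s : Int) (j : Nat) => s + (- pvSteps ok (a.getD j 0) (d.getD j 0))) _
      (by intro acc j hj; ring)]
    rw [PySem.List.foldl_add]
    rw [pv_range_zip a d n.toNat (fun ai di => - pvSteps ok ai di) hm1 hm2]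
    show k + (((a.take n.toNat).zip (d.take n.toNat)).map _).sum = k - pvNeed _ ok
    rw [pvNeed, show (fun p : Int × Int => - pvSteps ok p.1 p.2) = (fun x : Int => -x) ∘ (fun p : Int × Int => pvSteps ok p.1 p.2) from rfl,
      ← List.map_map, ← List.sum_neg]
    ring
  · show List.foldl _ ([] : List (Int × Int)) _ = _
    rw [PySem.List.foldl_append_singleton_eq_map]
    simp

lemma pvSorted2_eq_sortL (l : List (Int × Int)) :
    PySem.List.sorted2 l (fun p => p.1) (fun p => p.2) = pvSortL l := by
  rw [pvSortL, PySem.List.sorted_eq_foldl_insertBy, PySem.List.sorted2]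
  congr 1
  funext acc x
  congr 1
  funext a b
  show (decide (a.1 < b.1) || (!decide (b.1 < a.1) && decide (a.2 < b.2))) = decide (toLex a < toLex b)
  rcases lt_trichotomy a.1 b.1 with h | h | h
  · simp [Prod.Lex.lt_iff, h]
  · simp [Prod.Lex.lt_iff, h, lt_irrefl]
  · simp only [Prod.Lex.lt_iff]
    have h1 : ¬ a.1 < b.1 := by omega
    have h2 : ¬ a.1 = b.1 := by omega
    simp [h1, h2, not_lt_of_gt h]
    omega

lemma pvSorted_fst (M : List (Int × Int)) :
    PySem.List.sorted (M.map Prod.fst) (fun v => v) = (pvSortL M).map Prod.fst := by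
  apply PySem.List.sorted_id_eq_of_perm_of_pairwise
  · exact (PySem.List.sorted_perm M _ false).map Prod.fst
  · refine List.Pairwise.map _ ?_ (PySem.List.sorted_pairwise M (fun p => toLex p))
    intro p q h
    rcases Prod.Lex.le_iff.1 h with h1 | ⟨h1, _⟩
    · exact le_of_lt h1
    · exact le_of_eq h1

-- ===== VERDICT (by name: the statement is the Claim_ definition above) =====
theorem solve_spec : Claim_equal_solve := by
  intro k n a d hdom hpre
  obtain ⟨hna, hndlen, hdpos, hkn⟩ := hpre
  show solve k n a d = solve_alt k n a d
  have hmA : n.toNat ≤ a.length := by omega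
  have hmD : n.toNat ≤ d.length := by omega
  -- the cost comparisons of the two binary searches agree
  have hpyr : PySem.List.pyRange 0 n 1 = (List.range n.toNat).map (fun j : Nat => (j : Int)) := by
    rw [PySem.List.pyRange_one]; simp
  have hterm : ∀ y, ((PySem.List.pyRange 0 n 1).map
      (fun i => pvSteps y (PySem.List.pyGetD a i 0) (PySem.List.pyGetD d i 0))).sum =
      pvNeed ((a.take n.toNat).zip (d.take n.toNat)) y := by
    intro y
    rw [hpyr, List.map_map]
    have hco : ((fun i => pvSteps y (PySem.List.pyGetD a i 0) (PySem.List.pyGetD d i 0)) ∘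
        (fun j : Nat => (j : Int))) = fun j : Nat => pvSteps y (a.getD j 0) (d.getD j 0) := by
      funext j; simp
    rw [hco, pv_range_zip a d n.toNat (fun ai di => pvSteps y ai di) hmA hmD]
    rfl
  have hsign : ∀ y, pvCalc k n a d y < 0 ↔
      ¬ pvNeed ((a.take n.toNat).zip (d.take n.toNat)) y ≤ k := by
    intro y
    have hcond : ∀ i ∈ PySem.List.pyRange 0 n 1,
        PySem.List.pyGetD a i 0 < y → 1 ≤ PySem.List.pyGetD d i 0 := by
      intro i hi _
      rw [hpyr] at hi
      rcases List.mem_map.1 hi with ⟨j, hj, rfl⟩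
      rw [PySem.List.pyGetD_natCast]
      exact hdpos j (List.mem_range.1 hj)
    have hspec := pvCalcLoop_spec a d y (PySem.List.pyRange 0 n 1) k hcond
    unfold pvCalc
    rw [hspec.1, hterm y]
    constructor <;> intro <;> omega
  have hok : pvBisA k n a d 1 (10 ^ 20) = pvBisB k ((a.take n.toNat).zip (d.take n.toNat)) 1 (10 ^ 20) :=
    pvBis_eq k n a d _ hsign ((10 ^ 20 - 1 : Int)).toNat 1 (10 ^ 20) rfl
  set seqs := (a.take n.toNat).zip (d.take n.toNat) with hseqs
  have hseqsB : (PySem.List.pyRange 0 n 1).map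
      (fun i => (PySem.List.pyGetD a i 0, PySem.List.pyGetD d i 0)) = seqs := by
    rw [hpyr, List.map_map]
    have hco : ((fun i => (PySem.List.pyGetD a i 0, PySem.List.pyGetD d i 0)) ∘
        (fun j : Nat => (j : Int))) = fun j : Nat => ((a.getD j 0 : Int), (d.getD j 0 : Int)) := by
      funext j; simp
    rw [hco, pv_range_zip a d n.toNat (fun ai di => (ai, di)) hmA hmD]
    simp
    rfl
  set ok := pvBisB k seqs 1 (10 ^ 20) with hokd
  set lstR := (List.range n.toNat).map (fun j =>
    (a.getD j 0 + d.getD j 0 * pvSteps ok (a.getD j 0) (d.getD j 0), (j : Int))) with hlst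
  set ANS := (seqs.map (fun p =>
      p.1 * pvSteps ok p.1 p.2 +
      PySem.Int.floordiv (p.2 * pvSteps ok p.1 p.2 * (pvSteps ok p.1 p.2 - 1)) 2)).sum with hANS
  set r := k - pvNeed seqs ok with hrd
  have hLHS : solve k n a d = pvGreedy d r (pvSortL lstR) ANS := by
    show pvGreedy d (pvPhase1 k n a d (pvBisA k n a d 1 (10 ^ 20))).2.1
        (PySem.List.sorted2 (pvPhase1 k n a d (pvBisA k n a d 1 (10 ^ 20))).2.2
          (fun p => p.1) (fun p => p.2))
        (pvPhase1 k n a d (pvBisA k n a d 1 (10 ^ 20))).1 = _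
    rw [hok, pvPhase1_spec k n a d ok hna hndlen, pvSorted2_eq_sortL]
  have hRHS : solve_alt k n a d =
      (if 0 < r then
        ANS + (PySem.List.slice
          (PySem.List.sorted (seqs.flatMap (fun p =>
            (PySem.List.pyRange 0 r 1).map (fun t => p.1 + p.2 * (pvSteps ok p.1 p.2 + t))))
            (fun v => v)) none (some r)).sum
      else ANS) := by
    show (if 0 < k - pvNeed ((PySem.List.pyRange 0 n 1).map
              (fun i => (PySem.List.pyGetD a i 0, PySem.List.pyGetD d i 0)))
            (pvBisB k ((PySem.List.pyRange 0 n 1).map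
              (fun i => (PySem.List.pyGetD a i 0, PySem.List.pyGetD d i 0))) 1 (10 ^ 20)) then _ else _) = _
    rw [hseqsB]
  rw [hLHS, hRHS]
  by_cases hr : 0 < r
  · rw [if_pos hr, PySem.List.slice_to _ hr.le]
    set c := r.toNat with hcd
    have hrc : r = (c : Int) := (Int.toNat_of_nonneg hr.le).symm
    -- hypotheses of the core lemma for the sorted phase-1 list
    have hpwS : List.Pairwise pvLe (pvSortL lstR) :=
      (PySem.List.sorted_pairwise lstR (fun p => toLex p)).imp (fun h => h)
    have hsndR : lstR.map Prod.snd = (List.range n.toNat).map (fun j : Nat => (j : Int)) := by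
      rw [hlst, List.map_map]
      rfl
    have hndS : ((pvSortL lstR).map Prod.snd).Nodup := by
      have hperm : ((pvSortL lstR).map Prod.snd).Perm (lstR.map Prod.snd) :=
        (PySem.List.sorted_perm lstR (fun p => toLex p) false).map Prod.snd
      have h2 : (lstR.map Prod.snd).Nodup := by
        rw [hsndR]
        exact List.Nodup.map (fun x y h => by exact_mod_cast h) List.nodup_range
      exact hperm.symm.nodup h2
    have hgS : pvGood d (pvSortL lstR) := by
      intro q hq
      have hq2 : q ∈ lstR := (PySem.List.mem_sorted lstR _ false q).1 hq
      rcases List.mem_map.1 (hlst ▸ hq2) with ⟨j, hj, rfl⟩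
      refine ⟨by positivity, ?_⟩
      show (1 : Int) ≤ d.getD ((j : Int)).toNat 0
      rw [Int.toNat_natCast]
      exact hdpos j (List.mem_range.1 hj)
    have hA := pvGreedy_eq d c (pvSortL lstR) ANS hpwS hndS hgS
    rw [hrc, hA]
    congr 1
    -- the value side: sorting the emitted values is sorting the emitted pairs
    have hpyr2 : PySem.List.pyRange 0 ((c : Nat) : Int) 1 = (List.range c).map (fun t : Nat => (t : Int)) := by
      rw [PySem.List.pyRange_one]; simp
    have hflat : (seqs.flatMap (fun p =>
        ((List.range c).map (fun t : Nat => (t : Int))).map (fun t => p.1 + p.2 * (pvSteps ok p.1 p.2 + t)))) =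
        (pvExpand d c lstR).map Prod.fst := by
      rw [pvExpand, List.map_flatMap, hlst, List.flatMap_map]
      rw [List.flatMap_def, List.flatMap_def]
      congr 1
      rw [← pv_range_zip a d n.toNat (fun ai di =>
        ((List.range c).map (fun t : Nat => (t : Int))).map (fun t => ai + di * (pvSteps ok ai di + t))) hmA hmD]
      apply List.map_congr_left
      intro j hj
      rw [List.map_map, List.map_map]
      apply List.map_congr_left
      intro t ht
      show a.getD j 0 + d.getD j 0 * (pvSteps ok (a.getD j 0) (d.getD j 0) + (t : Int)) =
        ((a.getD j 0 + d.getD j 0 * pvSteps ok (a.getD j 0) (d.getD j 0), ((j : Nat) : Int)).1 +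
          pvDD d (a.getD j 0 + d.getD j 0 * pvSteps ok (a.getD j 0) (d.getD j 0), ((j : Nat) : Int)) * (t : Int))
      simp only [pvDD, Int.toNat_natCast]
      ring
    have hpermE : (pvExpand d c (pvSortL lstR)).Perm (pvExpand d c lstR) :=
      List.Perm.flatMap (PySem.List.sorted_perm lstR (fun p => toLex p) false) (fun a _ => List.Perm.refl _)
    have hsortv : PySem.List.sorted (seqs.flatMap (fun p =>
        (PySem.List.pyRange 0 ((c : Nat) : Int) 1).map (fun t => p.1 + p.2 * (pvSteps ok p.1 p.2 + t))))
        (fun v => v) = (pvSortL (pvExpand d c (pvSortL lstR))).map Prod.fst := by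
      rw [hpyr2, hflat, ← pvSorted_fst]
      exact PySem.List.sorted_eq_sorted_of_perm _ _ _ (fun x y h => h) ((hpermE.map Prod.fst).symm)
    rw [hsortv, ← List.map_take]
  · rw [if_neg hr, pvGreedy.eq_def, dif_neg hr]
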